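-- pv_equiv track=rewrite | github.com/tienviitta/polar-codes | polarcodes/SCD.py | active_llr_level
-- ===== SOURCE A (Python) =====
-- def active_llr_level(i, n):
--     """
--         Find the first 1 in the binary expansion of i.
--     """
--     mask = 2**(n-1)
--     for k in range(n):
--         if (mask & i) == 0:
--             mask >>= 1
--         else:
--             break
--     return k
-- ===== SOURCE B (Python) =====
-- def active_llr_level(i, n):
--     low = i & ((1 << n) - 1)
--     return n - (low | 1).bit_length()
-- ===== Notes on version B (the rewrite author's own statement) =====
-- stated objective: faster
-- what changed: Replaces A's bit-by-bit scan from the top mask down (O(n) loop) with a closed-form computation: mask the low n bits and subtract their bit_length; (low|1) makes the all-zero fall-through case n-1 come out of the same formula.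
import Mathlib
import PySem

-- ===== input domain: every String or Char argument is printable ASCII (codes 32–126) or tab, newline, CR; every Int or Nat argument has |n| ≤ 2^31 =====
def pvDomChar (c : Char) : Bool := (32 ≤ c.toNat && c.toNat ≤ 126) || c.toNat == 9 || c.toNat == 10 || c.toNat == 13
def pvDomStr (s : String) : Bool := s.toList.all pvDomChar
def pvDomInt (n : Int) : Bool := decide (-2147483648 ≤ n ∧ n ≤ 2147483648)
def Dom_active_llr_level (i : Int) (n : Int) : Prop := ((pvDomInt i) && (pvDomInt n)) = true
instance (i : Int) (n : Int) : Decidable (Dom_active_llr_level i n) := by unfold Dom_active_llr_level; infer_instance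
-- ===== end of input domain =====

-- B replaces A's bit-by-bit scan from the top mask down with a closed-form bit_length computation (measured faster).

-- ===== PORT A =====
-- the for-loop: ks = remaining iterations of range(n), k = the loop variable's last value
-- (initialised to 0 here; under Pre_ the range is non-empty so it is always overwritten,
-- exactly where Python's k would otherwise be unbound)
def pvAGo (i : Int) (mask : Int) (ks : List Int) (k : Int) : Int :=
  match ks with
  | [] => k
  | c :: rest => if PySem.Int.band mask i = 0 then pvAGo i (mask >>> (1:Nat)) rest c else c

def active_llr_level (i : Int) (n : Int) : Int :=
  pvAGo i ((2:Int) ^ (n - 1).toNat) (PySem.List.pyRange 0 n) 0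

-- ===== PORT B =====
def active_llr_level_alt (i : Int) (n : Int) : Int :=
  let low := PySem.Int.band i (((1:Int) <<< n.toNat) - 1)
  n - (PySem.Int.bitLength (PySem.Int.bor low 1) : Int)

-- ===== PRECONDITION & SPEC =====
-- Pre_: A raises UnboundLocalError for n ≤ 0 (range(n) is empty, so `return k` hits an unbound name);
-- Python's 1 << n in B would raise for n < 0 too. Pre_ keeps exactly the inputs where A returns.
def Pre_active_llr_level (i : Int) (n : Int) : Prop := 1 ≤ n
instance (i : Int) (n : Int) : Decidable (Pre_active_llr_level i n) := by unfold Pre_active_llr_level; infer_instance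
def pvWitness_active_llr_level : Int × Int := (12, 6)

def Spec_active_llr_level (i : Int) (n : Int) (out : Int) : Prop := out = active_llr_level_alt i n
instance (i : Int) (n : Int) (out : Int) : Decidable (Spec_active_llr_level i n out) := by unfold Spec_active_llr_level; infer_instance

-- ===== CLAIM (what is proved, stated in full; the proofs are below) =====
def Claim_equal_active_llr_level : Prop := ∀ (i : Int) (n : Int), Dom_active_llr_level i n → Pre_active_llr_level i n → Spec_active_llr_level i n (active_llr_level i n)

-- ===== LEMMAS AND PROOFS =====

theorem pv_testBit_top (y k : Nat) (h : y < 2 ^ (k + 1)) : y.testBit k = decide (2 ^ k ≤ y) := by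
  rw [Nat.testBit_eq_decide_div_mod_eq]
  have h2 : y / 2 ^ k < 2 := Nat.div_lt_of_lt_mul (by rw [← pow_succ]; exact h)
  rcases Nat.lt_or_ge y (2 ^ k) with hy | hy
  · rw [Nat.div_eq_of_lt hy]; simp; omega
  · have h1 : 1 ≤ y / 2 ^ k := (Nat.one_le_div_iff (by positivity)).mpr hy
    have : y / 2 ^ k = 1 := by omega
    rw [this]; simp [hy]

theorem pv_neg_emod (j m : Nat) :
    ((-(↑j + 1) : Int)).emod ((2:Int) ^ m) = (2:Int) ^ m - 1 - ↑(j % 2 ^ m) := by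
  show (-(↑j + 1) : Int) % (2:Int)^m = _
  have hp : (0:Int) < 2 ^ m := by positivity
  have hj : ((j % 2 ^ m : Nat) : Int) = (j : Int) % 2 ^ m := by push_cast; ring
  rw [hj]
  have h0 : 0 ≤ (j:Int) % 2^m := Int.emod_nonneg _ (by positivity)
  have h1 : (j:Int) % 2^m < 2^m := Int.emod_lt_of_pos _ hp
  have hq := Int.mul_ediv_add_emod (j:Int) (2^m)
  have : (-(↑j + 1) : Int) = (2^m - 1 - (j:Int) % 2^m) + 2^m * (-((j:Int)/2^m) - 1) := by linarith
  rw [this, Int.add_mul_emod_self_left, Int.emod_eq_of_lt (by linarith) (by linarith)]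

theorem pv_band_mask (i : Int) (m : Nat) :
    PySem.Int.band i ((2:Int) ^ m - 1) = i.emod ((2:Int) ^ m) := by
  have h1n : (1:Nat) ≤ 2 ^ m := Nat.one_le_two_pow
  have hm : ((2:Int) ^ m - 1) = ((2 ^ m - 1 : Nat) : Int) := by push_cast [h1n]; ring
  have hnn : (0:Int) ≤ 2 ^ m - 1 := by rw [hm]; positivity
  have ht : ((2:Int) ^ m - 1).toNat = 2 ^ m - 1 := by rw [hm]; exact Int.toNat_natCast _
  rcases le_or_gt 0 i with hi | hi
  · rw [PySem.Int.band_of_nonneg hi hnn, ht, Nat.and_two_pow_sub_one_eq_mod]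
    conv_rhs => rw [← Int.toNat_of_nonneg hi]
    norm_cast
  · have hi' : ¬ 0 ≤ i := by omega
    unfold PySem.Int.band
    rw [if_neg hi', if_pos hnn]
    have hji : i = -(((-i - 1).toNat : Int) + 1) := by omega
    rw [show i.emod ((2:Int)^m) = (-(((-i - 1).toNat : Int) + 1)).emod ((2:Int)^m) from by rw [← hji]]
    rw [pv_neg_emod, ht, Nat.and_comm, Nat.and_two_pow_sub_one_eq_mod]
    have h2 : (-i - 1).toNat % 2 ^ m < 2 ^ m := Nat.mod_lt _ (by positivity)
    rw [Nat.cast_sub (by omega), Nat.cast_sub (by omega)]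
    push_cast; ring

theorem pv_band_pow (i : Int) (k : Nat) :
    (PySem.Int.band ((2:Int) ^ k) i = 0) ↔ i.emod ((2:Int) ^ (k + 1)) < (2:Int) ^ k := by
  have hpk : (0:Int) ≤ 2 ^ k := by positivity
  have htk : ((2:Int) ^ k).toNat = 2 ^ k := by
    rw [show ((2:Int)^k) = ((2^k : Nat) : Int) from by push_cast; ring]; exact Int.toNat_natCast _
  rcases le_or_gt 0 i with hi | hi
  · rw [PySem.Int.band_of_nonneg hpk hi, htk, Nat.two_pow_and]
    have hy : i.toNat % 2 ^ (k+1) < 2 ^ (k+1) := Nat.mod_lt _ (by positivity)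
    have hbit : i.toNat.testBit k = (i.toNat % 2 ^ (k+1)).testBit k := by
      rw [Nat.testBit_mod_two_pow]; simp
    have hemod : i.emod ((2:Int) ^ (k+1)) = ((i.toNat % 2 ^ (k+1) : Nat) : Int) := by
      conv_lhs => rw [show i.emod ((2:Int)^(k+1)) = i % 2^(k+1) from rfl, ← Int.toNat_of_nonneg hi]
      push_cast; ring
    rw [hemod, hbit, pv_testBit_top _ _ hy]
    rcases Nat.lt_or_ge (i.toNat % 2 ^ (k+1)) (2 ^ k) with h | h
    · simp [Nat.not_le.mpr h]
      rw [max_eq_left hi, show (i % 2^(k+1) : Int) = ((i.toNat % 2^(k+1) : Nat) : Int) from hemod]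
      exact_mod_cast h
    · simp [h]
      rw [max_eq_left hi, show (i % 2^(k+1) : Int) = ((i.toNat % 2^(k+1) : Nat) : Int) from hemod]
      exact_mod_cast h
  · have hi' : ¬ 0 ≤ i := by omega
    unfold PySem.Int.band
    rw [if_pos hpk, if_neg hi', htk]
    set j := (-i - 1).toNat with hjdef
    have hji : i = -((j : Int) + 1) := by omega
    have hy : j % 2 ^ (k+1) < 2 ^ (k+1) := Nat.mod_lt _ (by positivity)
    have hbit : j.testBit k = (j % 2 ^ (k+1)).testBit k := by
      rw [Nat.testBit_mod_two_pow]; simp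
    rw [Nat.two_pow_and, show i.emod ((2:Int)^(k+1)) = (-((j:Int)+1)).emod ((2:Int)^(k+1)) from by rw [← hji]]
    rw [pv_neg_emod, hbit, pv_testBit_top _ _ hy]
    rcases Nat.lt_or_ge (j % 2 ^ (k+1)) (2 ^ k) with h | h
    · simp [Nat.not_le.mpr h]
      have hc1 : ((j % 2 ^ (k+1) : Nat) : Int) < 2 ^ k := by exact_mod_cast h
      have hc0 : (0:Int) ≤ ((j % 2 ^ (k+1) : Nat) : Int) := by positivity
      have hpw : (2:Int) ^ (k+1) = 2^k * 2 := by rw [pow_succ]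
      linarith
    · simp [h]
      have hc1 : ((2:Nat) ^ k : Int) ≤ ((j % 2 ^ (k+1) : Nat) : Int) := by exact_mod_cast h
      have hpw : (2:Int) ^ (k+1) = 2^k * 2 := by rw [pow_succ]
      push_cast at hc1 ⊢
      linarith

theorem pv_bitLength_eq (x : Int) (a : Nat) (h1 : (2:Int) ^ a ≤ x) (h2 : x < (2:Int) ^ (a + 1)) :
    PySem.Int.bitLength x = a + 1 := by
  have hx0 : x ≠ 0 := by
    have hp : (0:Int) < 2 ^ a := by positivity
    omega
  have hL := PySem.Int.two_pow_bitLength_le x hx0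
  have hU := PySem.Int.lt_two_pow_bitLength x
  set bl := PySem.Int.bitLength x with hbl
  have hxnn : 0 ≤ x := le_trans (by positivity) h1
  have hna : (x.natAbs : Int) = x := Int.natAbs_of_nonneg hxnn
  have h1' : 2 ^ a ≤ x.natAbs := by
    have : ((2 ^ a : Nat) : Int) ≤ (x.natAbs : Int) := by rw [hna]; push_cast; exact h1
    exact_mod_cast this
  have h2' : x.natAbs < 2 ^ (a + 1) := by
    have : (x.natAbs : Int) < ((2 ^ (a+1) : Nat) : Int) := by rw [hna]; push_cast; exact h2
    exact_mod_cast this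
  by_contra hne
  rcases Nat.lt_or_ge bl (a + 1) with hlt | hge
  · have : 2 ^ bl ≤ 2 ^ a := Nat.pow_le_pow_right (by norm_num) (by omega)
    omega
  · have hge2 : a + 2 ≤ bl := by omega
    have : 2 ^ (a + 1) ≤ 2 ^ (bl - 1) := Nat.pow_le_pow_right (by norm_num) (by omega)
    omega

theorem pv_aGo_spec : ∀ (m : Nat), 1 ≤ m → ∀ (i n k0 : Int),
    pvAGo i ((2:Int) ^ (m - 1)) (PySem.List.pyRange (n - m) n) k0
      = if i.emod ((2:Int) ^ m) = 0 then n - 1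
        else n - (PySem.Int.bitLength (i.emod ((2:Int) ^ m)) : Int) := by
  intro m hm
  induction m, hm using Nat.le_induction with
  | base =>
    intro i n k0
    have hcons : PySem.List.pyRange (n - 1) n = (n - 1) :: PySem.List.pyRange (n - 1 + 1) n :=
      PySem.List.pyRange_one_cons (by omega)
    have hnil : PySem.List.pyRange (n - 1 + 1) n = [] := by
      have : n - 1 + 1 = n := by ring
      rw [this, PySem.List.pyRange_one]
      simp
    rw [show ((1:Nat):Int) = (1:Int) from by norm_num, hcons, hnil]
    have hL : pvAGo i ((2:Int) ^ (1 - 1)) [n - 1] k0 = n - 1 := by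
      simp only [pvAGo]
      split_ifs <;> rfl
    rw [hL]
    rcases eq_or_ne (i.emod ((2:Int) ^ 1)) 0 with hr | hr
    · rw [if_pos hr]
    · rw [if_neg hr]
      have h0 : 0 ≤ i.emod ((2:Int) ^ 1) := Int.emod_nonneg _ (by norm_num)
      have h1 : i.emod ((2:Int) ^ 1) < 2 := by
        have := Int.emod_lt_of_pos i (show (0:Int) < 2^1 by norm_num)
        simpa using this
      have : i.emod ((2:Int) ^ 1) = 1 := by omega
      rw [this]
      norm_num [show PySem.Int.bitLength 1 = 1 from by decide]
  | succ m hm IH =>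
    intro i n k0
    have hlt : n - ((m + 1 : Nat) : Int) < n := by push_cast; omega
    rw [PySem.List.pyRange_one_cons hlt]
    simp only [pvAGo]
    have hrest : n - ((m + 1 : Nat) : Int) + 1 = n - (m : Int) := by push_cast; ring
    have hshift : ((2:Int) ^ ((m + 1) - 1)) >>> (1:Nat) = (2:Int) ^ (m - 1) := by
      have hsplit : (2:Int) ^ ((m + 1) - 1) = 2 ^ (m - 1) * 2 := by
        rw [← pow_succ]; congr 1; omega
      rw [Int.shiftRight_eq_div_pow, hsplit]
      norm_num
    have hpos : (0:Int) < 2 ^ (m + 1) := by positivity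
    rcases eq_or_ne (PySem.Int.band ((2:Int) ^ ((m + 1) - 1)) i) 0 with hband | hband
    · rw [if_pos hband, hshift, hrest]
      rw [IH i n]
      have hband' := (pv_band_pow i m).mp (by simpa using hband)
      have hd : ((2:Int) ^ m) ∣ 2 ^ (m + 1) := pow_dvd_pow 2 (by omega)
      have he1 : i.emod ((2:Int) ^ (m + 1)) % 2 ^ m = i % 2 ^ m := Int.emod_emod_of_dvd i hd
      have hr0 : 0 ≤ i.emod ((2:Int) ^ (m + 1)) := Int.emod_nonneg _ (by omega)
      have he2 : i.emod ((2:Int) ^ (m + 1)) % 2 ^ m = i.emod ((2:Int) ^ (m + 1)) :=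
        Int.emod_eq_of_lt hr0 hband'
      have key : i.emod ((2:Int) ^ m) = i.emod ((2:Int) ^ (m + 1)) := by
        rw [← he2, he1]; rfl
      rw [key]
    · rw [if_neg hband]
      have hge : (2:Int) ^ m ≤ i.emod ((2:Int) ^ (m + 1)) := by
        by_contra hc
        exact hband (by simpa using (pv_band_pow i m).mpr (not_le.mp hc))
      have hup : i.emod ((2:Int) ^ (m + 1)) < 2 ^ (m + 1) := Int.emod_lt_of_pos _ hpos
      have hne : i.emod ((2:Int) ^ (m + 1)) ≠ 0 := by
        have : (0:Int) < 2 ^ m := by positivity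
        omega
      rw [if_neg hne, pv_bitLength_eq _ m hge hup]

theorem pv_final (i n : Int) (hn : 1 ≤ n) : active_llr_level i n = active_llr_level_alt i n := by
  set m := n.toNat with hmdef
  have hm1 : 1 ≤ m := by omega
  have hnm : (m : Int) = n := by omega
  have hA : active_llr_level i n
      = if i.emod ((2:Int) ^ m) = 0 then n - 1
        else n - (PySem.Int.bitLength (i.emod ((2:Int) ^ m)) : Int) := by
    unfold active_llr_level
    have h1 : (n - 1).toNat = m - 1 := by omega
    have h2 : (0:Int) = n - (m : Int) := by omega
    rw [h1, show PySem.List.pyRange 0 n = PySem.List.pyRange (n - (m:Int)) n from by rw [← h2]]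
    exact pv_aGo_spec m hm1 i n 0
  have hlow : PySem.Int.band i (((1:Int) <<< n.toNat) - 1) = i.emod ((2:Int) ^ m) := by
    rw [show ((1:Int) <<< n.toNat) = (2:Int) ^ m from by rw [Int.shiftLeft_eq, one_mul]]
    exact pv_band_mask i m
  unfold active_llr_level_alt
  simp only [hlow, hA]
  set r := i.emod ((2:Int) ^ m) with hrdef
  have hr0 : 0 ≤ r := Int.emod_nonneg _ (by positivity)
  rcases eq_or_ne r 0 with hr | hr
  · rw [if_pos hr, hr]
    rw [show PySem.Int.bor 0 1 = 1 from by rw [PySem.Int.bor_comm]; exact PySem.Int.bor_zero 1]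
    norm_num [show PySem.Int.bitLength 1 = 1 from by decide]
  · rw [if_neg hr]
    have hbor : PySem.Int.bor r 1 = ((r.toNat ||| 1 : Nat) : Int) := by
      rw [PySem.Int.bor_of_nonneg hr0 (by norm_num)]
      norm_num
    set bl := PySem.Int.bitLength r with hbl
    have hrne : r ≠ 0 := hr
    have hb1 := PySem.Int.two_pow_bitLength_le r hrne
    have hb2 := PySem.Int.lt_two_pow_bitLength r
    have hna : r.natAbs = r.toNat := by omega
    rw [hna] at hb1 hb2
    rw [← hbl] at hb1 hb2
    have hbl1 : 1 ≤ bl := by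
      by_contra hc
      have : bl = 0 := by omega
      rw [this] at hb2
      simp at hb2
      omega
    have hor1 : 2 ^ (bl - 1) ≤ r.toNat ||| 1 := le_trans hb1 Nat.left_le_or
    have hor2 : r.toNat ||| 1 < 2 ^ bl :=
      Nat.or_lt_two_pow hb2 (lt_of_lt_of_le (by norm_num) (Nat.pow_le_pow_right (by norm_num) hbl1))
    have hbleq : PySem.Int.bitLength ((r.toNat ||| 1 : Nat) : Int) = (bl - 1) + 1 := by
      apply pv_bitLength_eq
      · exact_mod_cast hor1
      · rw [show (bl - 1) + 1 = bl from by omega]; exact_mod_cast hor2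
    rw [hbor, hbleq, show (bl - 1) + 1 = bl from by omega]

-- ===== VERDICT (by name: the statement is the Claim_ definition above) =====
theorem active_llr_level_spec : Claim_equal_active_llr_level := by
  intro i n _ hpre
  unfold Spec_active_llr_level
  exact pv_final i n hpre
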